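-- pv_equiv track=rewrite | github.com/HungNguyenn201/SmartWPA | check.py | _find_timeseries_ids
-- ===== SOURCE A (Python) =====
-- def _find_timeseries_ids(ts_data, direction_source):
--     """Tìm timeseries IDs cho wind_speed và direction"""
--     wind_speed_ts_id = None
--     direction_ts_id = None
--
--     for ts_id, field in ts_data.items():
--         if field == 'WIND_SPEED':
--             wind_speed_ts_id = ts_id
--         elif field == 'DIRECTION_WIND' and direction_source == 'wind_direction':
--             direction_ts_id = ts_id
--         elif field == 'NACELLE_POSITION' and direction_source == 'nacelle_direction':
--             direction_ts_id = ts_id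
--
--     return wind_speed_ts_id, direction_ts_id
-- ===== SOURCE B (Python) =====
-- def _find_timeseries_ids(ts_data, direction_source):
--     """Tim timeseries IDs cho wind_speed va direction (backward scan, first match)"""
--     items = list(ts_data.items())
--     # last occurrence wins in A, so scan back-to-front and stop at the FIRST match
--     wind_speed_ts_id = next(
--         (ts_id for ts_id, field in reversed(items) if field == 'WIND_SPEED'), None)
--     target = {'wind_direction': 'DIRECTION_WIND',
--               'nacelle_direction': 'NACELLE_POSITION'}.get(direction_source)
--     direction_ts_id = None if target is None else next(
--         (ts_id for ts_id, field in reversed(items) if field == target), None)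
--     return wind_speed_ts_id, direction_ts_id
-- ===== Notes on version B (the rewrite author's own statement) =====
-- stated objective: alternative
-- what changed: Instead of one forward pass with if/elif branches updating two accumulators (last match wins), B scans the items back-to-front with early-exit generators, taking the FIRST match for WIND_SPEED and for the field chosen by a direction_source lookup table (skipped entirely when the source is unrecognized); correct because the first match in reverse order is the last match in forward order.
import Mathlib
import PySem

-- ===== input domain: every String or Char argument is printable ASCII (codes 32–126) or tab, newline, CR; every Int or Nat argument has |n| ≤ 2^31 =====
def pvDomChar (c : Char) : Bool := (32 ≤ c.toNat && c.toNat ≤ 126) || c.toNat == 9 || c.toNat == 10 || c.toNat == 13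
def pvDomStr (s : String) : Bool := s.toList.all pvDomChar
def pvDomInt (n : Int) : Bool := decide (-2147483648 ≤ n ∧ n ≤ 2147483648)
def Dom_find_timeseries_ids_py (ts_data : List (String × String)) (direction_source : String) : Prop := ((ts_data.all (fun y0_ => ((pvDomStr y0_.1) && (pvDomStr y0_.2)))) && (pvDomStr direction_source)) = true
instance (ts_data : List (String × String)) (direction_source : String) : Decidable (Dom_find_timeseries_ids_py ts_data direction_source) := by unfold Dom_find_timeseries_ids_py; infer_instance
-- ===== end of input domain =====

-- B scans the items back-to-front with early exit, taking the first match for each target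
-- field (last match in A's forward order); alternative decomposition, same cost.

-- ===== PORT A =====
-- the for-loop over ts_data.items() updating the two accumulators, branches in order
def find_timeseries_ids_py (ts_data : List (String × String)) (direction_source : String) : Option String × Option String :=
  ts_data.foldl
    (fun (acc : Option String × Option String) p =>
      if p.2 = "WIND_SPEED" then (some p.1, acc.2)
      else if p.2 = "DIRECTION_WIND" ∧ direction_source = "wind_direction" then (acc.1, some p.1)
      else if p.2 = "NACELLE_POSITION" ∧ direction_source = "nacelle_direction" then (acc.1, some p.1)
      else acc)
    (none, none)

-- ===== PORT B =====
-- next((... for ... in reversed(items) if field == t), None)  =  reverse + find? + map fst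
def find_timeseries_ids_py_alt (ts_data : List (String × String)) (direction_source : String) : Option String × Option String :=
  let items := ts_data
  let wind_speed_ts_id := (items.reverse.find? (fun p => p.2 == "WIND_SPEED")).map Prod.fst
  let target : Option String :=
    (((PySem.Dict.empty).insert "wind_direction" "DIRECTION_WIND").insert
        "nacelle_direction" "NACELLE_POSITION").get? direction_source
  let direction_ts_id := match target with
    | none => none
    | some t => (items.reverse.find? (fun p => p.2 == t)).map Prod.fst
  (wind_speed_ts_id, direction_ts_id)

-- ===== PRECONDITION & SPEC =====
def Spec_find_timeseries_ids_py (ts_data : List (String × String)) (direction_source : String) (out : Option String × Option String) : Prop := out = find_timeseries_ids_py_alt ts_data direction_source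
instance (ts_data : List (String × String)) (direction_source : String) (out : Option String × Option String) : Decidable (Spec_find_timeseries_ids_py ts_data direction_source out) := by unfold Spec_find_timeseries_ids_py; infer_instance

-- ===== CLAIM (what is proved, stated in full; the proofs are below) =====
def Claim_equal_find_timeseries_ids_py : Prop := ∀ (ts_data : List (String × String)) (direction_source : String), Dom_find_timeseries_ids_py ts_data direction_source → Spec_find_timeseries_ids_py ts_data direction_source (find_timeseries_ids_py ts_data direction_source)

-- ===== LEMMAS AND PROOFS =====

-- A's fold computes the two components independently
theorem foldA_split (l : List (String × String)) (ds : String) (a b : Option String) :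
    l.foldl
      (fun (acc : Option String × Option String) p =>
        if p.2 = "WIND_SPEED" then (some p.1, acc.2)
        else if p.2 = "DIRECTION_WIND" ∧ ds = "wind_direction" then (acc.1, some p.1)
        else if p.2 = "NACELLE_POSITION" ∧ ds = "nacelle_direction" then (acc.1, some p.1)
        else acc)
      (a, b)
    = (l.foldl (fun acc p => if p.2 = "WIND_SPEED" then some p.1 else acc) a,
       l.foldl (fun acc p =>
          if (p.2 = "DIRECTION_WIND" ∧ ds = "wind_direction") ∨
             (p.2 = "NACELLE_POSITION" ∧ ds = "nacelle_direction") then some p.1 else acc) b) := by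
  induction l generalizing a b with
  | nil => rfl
  | cons p l ih =>
      simp only [List.foldl_cons]
      by_cases h1 : p.2 = "WIND_SPEED"
      · simp only [h1]; rw [ih]; simp
      · by_cases h2 : p.2 = "DIRECTION_WIND" ∧ ds = "wind_direction"
        · simp only [h1, if_pos h2]; rw [ih]; simp [h2]
        · by_cases h3 : p.2 = "NACELLE_POSITION" ∧ ds = "nacelle_direction"
          · simp only [if_neg h1, if_neg h2, if_pos h3]; rw [ih]; simp [h3]
          · simp only [if_neg h1, if_neg h2, if_neg h3]; rw [ih]; simp [h2, h3]

-- last-wins forward fold = first match of the reversed list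
theorem lastwinsP (P : String × String → Prop) [DecidablePred P] (l : List (String × String)) (a : Option String) :
    l.foldl (fun acc p => if P p then some p.1 else acc) a
      = ((l.reverse.find? (fun p => decide (P p))).map Prod.fst).or a := by
  induction l generalizing a with
  | nil => rfl
  | cons p l ih =>
      simp only [List.foldl_cons, List.reverse_cons, List.find?_append, ih]
      cases h : l.reverse.find? (fun p => decide (P p)) with
      | some q => simp
      | none =>
          by_cases hp : P p <;> simp [List.find?, hp, Option.or]

theorem find_timeseries_ids_py_spec : Claim_equal_find_timeseries_ids_py := by
  intro ts ds _
  show find_timeseries_ids_py ts ds = find_timeseries_ids_py_alt ts ds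
  unfold find_timeseries_ids_py find_timeseries_ids_py_alt
  rw [foldA_split]
  have hw := lastwinsP (fun p => p.2 = "WIND_SPEED") ts none
  have hwfun : (fun p : String × String => decide (p.2 = "WIND_SPEED"))
      = (fun p : String × String => p.2 == "WIND_SPEED") := by
    funext p; by_cases h : p.2 = "WIND_SPEED" <;> simp [h]
  rw [hwfun] at hw
  have hd := lastwinsP (fun p : String × String =>
      (p.2 = "DIRECTION_WIND" ∧ ds = "wind_direction") ∨
      (p.2 = "NACELLE_POSITION" ∧ ds = "nacelle_direction")) ts none
  rw [hw, hd]
  by_cases h1 : ds = "wind_direction"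
  · subst h1
    have hdfun : (fun p : String × String => decide
        ((p.2 = "DIRECTION_WIND" ∧ "wind_direction" = "wind_direction") ∨
         (p.2 = "NACELLE_POSITION" ∧ "wind_direction" = "nacelle_direction")))
        = (fun p : String × String => p.2 == "DIRECTION_WIND") := by
      funext p; by_cases h : p.2 = "DIRECTION_WIND" <;> simp [h]
    rw [hdfun]
    simp [PySem.Dict.get?_insert, PySem.Dict.get?_empty, Option.or_none]
  · by_cases h2 : ds = "nacelle_direction"
    · subst h2
      have hdfun : (fun p : String × String => decide
          ((p.2 = "DIRECTION_WIND" ∧ "nacelle_direction" = "wind_direction") ∨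
           (p.2 = "NACELLE_POSITION" ∧ "nacelle_direction" = "nacelle_direction")))
          = (fun p : String × String => p.2 == "NACELLE_POSITION") := by
        funext p; by_cases h : p.2 = "NACELLE_POSITION" <;> simp [h]
      rw [hdfun]
      simp [PySem.Dict.get?_insert, PySem.Dict.get?_empty, Option.or_none]
    · have hdfun : (fun p : String × String => decide
          ((p.2 = "DIRECTION_WIND" ∧ ds = "wind_direction") ∨
           (p.2 = "NACELLE_POSITION" ∧ ds = "nacelle_direction")))
          = (fun _ : String × String => false) := by
        funext p; simp [h1, h2]
      rw [hdfun]
      simp [PySem.Dict.get?_insert, PySem.Dict.get?_empty, Option.or_none, h1, h2]
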